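-- pv_equiv track=rewrite | github.com/HKU-BAL/Clair3 | preprocess/CreateTrainingTensorDirect.py | find_read_support
-- ===== SOURCE A (Python) =====
-- def find_read_support(pos, truth_alt_dict, alt_info):
--     """Check if truth variant has read support in the candidate. Replicates clair3.utils.find_read_support."""
--     alt_info_parts = alt_info.rstrip().split('-')
--     seqs = alt_info_parts[1].split(' ') if len(alt_info_parts) > 1 else ''
--     seq_alt_bases_dict = dict(zip(seqs[::2], [int(item) for item in seqs[1::2]])) if len(seqs) else {}
--
--     pos = int(pos)
--     if pos not in truth_alt_dict:
--         return None
--     ref_base_list, alt_base_list = truth_alt_dict[pos]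
--     found = 0
--     for alt_type in seq_alt_bases_dict:
--         if '*' in alt_type or '#' in alt_type or 'R' in alt_type:
--             continue
--         if alt_type[0] == 'X':
--             if alt_type[1] in alt_base_list:
--                 found += 1
--         elif alt_type[0] == 'I':
--             if alt_type[1:] in alt_base_list:
--                 found += 1
--         elif alt_type[0] == 'D':
--             del_cigar = alt_type[1:]
--             for rb, ab in zip(ref_base_list, alt_base_list):
--                 if rb[1:] == del_cigar and len(ab) == 1:
--                     found += 1
--     if found >= len(alt_base_list):
--         return True
--     return False
-- ===== SOURCE B (Python) =====
-- def find_read_support(pos, truth_alt_dict, alt_info):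
--     """Check if truth variant has read support in the candidate (inverted-loop rewrite).
--
--     Instead of re-scanning the truth ref/alt pairs for every deletion alt-type, it
--     builds the ordered, filtered set of distinct alt-type tokens once, counts the
--     X/I supports off that list, and then counts deletion support in a single pass
--     over the truth pairs by membership of 'D'+cigar in that set.
--     """
--     pos = int(pos)
--     if pos not in truth_alt_dict:
--         return None
--     ref_base_list, alt_base_list = truth_alt_dict[pos]
--     fields = alt_info.rstrip().split('-')
--     tokens = fields[1].split(' ') if len(fields) > 1 else []
--     seen = []
--     for t in tokens[0::2][:len(tokens) // 2]:
--         if t not in seen and '*' not in t and '#' not in t and 'R' not in t: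
--             seen.append(t)
--     found = 0
--     for k in seen:
--         if k[0] == 'X':
--             found += k[1] in alt_base_list
--         elif k[0] == 'I':
--             found += k[1:] in alt_base_list
--     for rb, ab in zip(ref_base_list, alt_base_list):
--         if len(ab) == 1 and 'D' + rb[1:] in seen:
--             found += 1
--     return found >= len(alt_base_list)
-- ===== Notes on version B (the rewrite author's own statement) =====
-- stated objective: alternative
-- what changed: B checks the position first, builds one ordered filtered set of distinct alt-type tokens (never parsing the unused counts), counts X/I support off that set, and counts deletion support by a single inverted pass over the truth ref/alt pairs testing membership of 'D'+cigar in the set, instead of A's dict(zip(...)) build with int() parsing and a rescan of the whole ref/alt zip for every deletion key.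
import Mathlib
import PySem

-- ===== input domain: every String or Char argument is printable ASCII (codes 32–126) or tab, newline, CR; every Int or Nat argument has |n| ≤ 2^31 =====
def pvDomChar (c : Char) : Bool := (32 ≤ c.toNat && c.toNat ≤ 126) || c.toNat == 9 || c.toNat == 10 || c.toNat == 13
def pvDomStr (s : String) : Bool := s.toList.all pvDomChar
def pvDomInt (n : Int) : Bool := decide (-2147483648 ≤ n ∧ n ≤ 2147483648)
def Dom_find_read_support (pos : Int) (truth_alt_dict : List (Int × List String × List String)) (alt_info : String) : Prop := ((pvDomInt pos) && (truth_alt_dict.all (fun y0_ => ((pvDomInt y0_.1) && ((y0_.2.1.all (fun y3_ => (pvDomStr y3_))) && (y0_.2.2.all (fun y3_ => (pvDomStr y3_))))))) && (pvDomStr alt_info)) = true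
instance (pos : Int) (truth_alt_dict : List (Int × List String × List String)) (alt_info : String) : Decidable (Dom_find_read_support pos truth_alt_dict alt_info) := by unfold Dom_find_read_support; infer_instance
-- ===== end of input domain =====

-- B inverts A's deletion loop: one ordered filtered set of distinct alt-type tokens, X/I counted
-- off that set, and deletion support counted in a single pass over the truth ref/alt pairs by
-- membership of 'D'+cigar in the set (objective: alternative; return value only, no mutation).

-- ===== PORT A =====
-- literal transliteration of A ('pos = int(pos)' is the identity here; the raising
-- int(item) / alt_type[0] / alt_type[1] are ported with PySem …? + a default that
-- Pre_find_read_support keeps unreachable)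
def find_read_support (pos : Int) (truth_alt_dict : List (Int × List String × List String)) (alt_info : String) : Option Bool :=
  let alt_info_parts := (PySem.Str.split? (PySem.Str.rstrip alt_info) "-").getD []
  let seqs : List String := if 1 < alt_info_parts.length then (PySem.Str.split? ((PySem.List.pyGet? alt_info_parts 1).getD "") " ").getD [] else []
  let seq_alt_bases_dict : PySem.Dict String Int :=
    if seqs.length ≠ 0 then
      PySem.Dict.ofList (((PySem.List.slice? seqs none none 2).getD []).zip
        (((PySem.List.slice? seqs (some 1) none 2).getD []).map (fun item => (PySem.Int.ofStr? item).getD 0)))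
    else PySem.Dict.empty
  match (PySem.Dict.mk truth_alt_dict).get? pos with
  | none => none
  | some (ref_base_list, alt_base_list) =>
    let found : Int := seq_alt_bases_dict.keys.foldl (fun found alt_type =>
      if PySem.Str.isIn "*" alt_type || PySem.Str.isIn "#" alt_type || PySem.Str.isIn "R" alt_type then found
      else if (PySem.Str.pyGet? alt_type 0).getD ' ' = 'X' then
        (if alt_base_list.contains (String.ofList [(PySem.Str.pyGet? alt_type 1).getD ' ']) then found + 1 else found)
      else if (PySem.Str.pyGet? alt_type 0).getD ' ' = 'I' then
        (if alt_base_list.contains (PySem.Str.slice alt_type (some 1) none) then found + 1 else found)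
      else if (PySem.Str.pyGet? alt_type 0).getD ' ' = 'D' then
        (ref_base_list.zip alt_base_list).foldl (fun found rb_ab =>
          if PySem.Str.slice rb_ab.1 (some 1) none == PySem.Str.slice alt_type (some 1) none
              && PySem.Str.len rb_ab.2 == 1 then found + 1 else found) found
      else found) 0
    if found ≥ (alt_base_list.length : Int) then some true else some false

-- ===== PORT B =====
-- literal transliteration of Source B ('D' + rb[1:] is built as the char list 'D' :: cigar)
def find_read_support_alt (pos : Int) (truth_alt_dict : List (Int × List String × List String)) (alt_info : String) : Option Bool :=
  match (PySem.Dict.mk truth_alt_dict).get? pos with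
  | none => none
  | some (ref_base_list, alt_base_list) =>
    let fields := (PySem.Str.split? (PySem.Str.rstrip alt_info) "-").getD []
    let tokens : List String := if 1 < fields.length then (PySem.Str.split? ((PySem.List.pyGet? fields 1).getD "") " ").getD [] else []
    let seen : List String := (((PySem.List.slice? tokens none none 2).getD []).take (tokens.length / 2)).foldl
      (fun seen t =>
        if t ∉ seen ∧ ¬ PySem.Str.isIn "*" t ∧ ¬ PySem.Str.isIn "#" t ∧ ¬ PySem.Str.isIn "R" t
        then seen ++ [t] else seen) []
    let found : Int := seen.foldl (fun found k =>
      if (PySem.Str.pyGet? k 0).getD ' ' = 'X' then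
        found + (if alt_base_list.contains (String.ofList [(PySem.Str.pyGet? k 1).getD ' ']) then 1 else 0)
      else if (PySem.Str.pyGet? k 0).getD ' ' = 'I' then
        found + (if alt_base_list.contains (PySem.Str.slice k (some 1) none) then 1 else 0)
      else found) 0
    let found := (ref_base_list.zip alt_base_list).foldl (fun found rb_ab =>
      if PySem.Str.len rb_ab.2 == 1
          && seen.contains (String.ofList ('D' :: (PySem.Str.slice rb_ab.1 (some 1) none).toList))
      then found + 1 else found) found
    some (decide (found ≥ (alt_base_list.length : Int)))

-- ===== PRECONDITION & SPEC =====
-- Pre_ excludes exactly the inputs where the Python A raises: a count token that int() rejects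
-- (ValueError), and — when pos is a key — a paired alt-type token that is empty, or starts with
-- 'X' with no second character (IndexError); A returns on every other input.
def Pre_find_read_support (pos : Int) (truth_alt_dict : List (Int × List String × List String)) (alt_info : String) : Prop :=
  let parts := (PySem.Str.split? (PySem.Str.rstrip alt_info) "-").getD []
  let seqs : List String := if 1 < parts.length then (PySem.Str.split? ((PySem.List.pyGet? parts 1).getD "") " ").getD [] else []
  let vals := (PySem.List.slice? seqs (some 1) none 2).getD []
  let keys := ((PySem.List.slice? seqs none none 2).getD []).take vals.length
  (∀ s ∈ vals, (PySem.Int.ofStr? s).isSome = true) ∧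
  (truth_alt_dict.any (fun p => p.1 == pos) = true →
    ∀ k ∈ keys, (PySem.Str.isIn "*" k || PySem.Str.isIn "#" k || PySem.Str.isIn "R" k) = true ∨
      (k.toList ≠ [] ∧ (k.toList.head? = some 'X' → 2 ≤ k.toList.length)))
instance (pos : Int) (truth_alt_dict : List (Int × List String × List String)) (alt_info : String) : Decidable (Pre_find_read_support pos truth_alt_dict alt_info) := by unfold Pre_find_read_support; infer_instance

def pvWitness_find_read_support : Int × (List (Int × List String × List String)) × String :=
  (1, [(1, (["CAC"], ["C"]))], "chr1:10-XC 2 DAC 1")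

def Spec_find_read_support (pos : Int) (truth_alt_dict : List (Int × List String × List String)) (alt_info : String) (out : Option Bool) : Prop := out = find_read_support_alt pos truth_alt_dict alt_info
instance (pos : Int) (truth_alt_dict : List (Int × List String × List String)) (alt_info : String) (out : Option Bool) : Decidable (Spec_find_read_support pos truth_alt_dict alt_info out) := by unfold Spec_find_read_support; infer_instance

-- ===== CLAIM (what is proved, stated in full; the proofs are below) =====
def Claim_equal_find_read_support : Prop := ∀ (pos : Int) (truth_alt_dict : List (Int × List String × List String)) (alt_info : String), Dom_find_read_support pos truth_alt_dict alt_info → Pre_find_read_support pos truth_alt_dict alt_info → Spec_find_read_support pos truth_alt_dict alt_info (find_read_support pos truth_alt_dict alt_info)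

-- ===== LEMMAS AND PROOFS =====

-- the token filter A applies inside its loop, as a Bool predicate
def pvGood (t : String) : Bool := !(PySem.Str.isIn "*" t || PySem.Str.isIn "#" t || PySem.Str.isIn "R" t)
-- 'D' + rb[1:]
def pvDstr (rb : String) : String := String.ofList ('D' :: (PySem.Str.slice rb (some 1) none).toList)
-- per-key X/I contribution (shared by both loop bodies)
def pvCXI (alts : List String) (k : String) : Int :=
  if (PySem.Str.pyGet? k 0).getD ' ' = 'X' then
    (if alts.contains (String.ofList [(PySem.Str.pyGet? k 1).getD ' ']) then 1 else 0)
  else if (PySem.Str.pyGet? k 0).getD ' ' = 'I' then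
    (if alts.contains (PySem.Str.slice k (some 1) none) then 1 else 0)
  else 0
-- A's inner-scan predicate for a D key, and the per-key deletion contribution
def pvQ (k : String) (rb_ab : String × String) : Bool :=
  PySem.Str.slice rb_ab.1 (some 1) none == PySem.Str.slice k (some 1) none && PySem.Str.len rb_ab.2 == 1
def pvCD (Z : List (String × String)) (k : String) : Int :=
  if (PySem.Str.pyGet? k 0).getD ' ' = 'D' then (Z.countP (pvQ k) : Int) else 0

-- seqs[1::2] has ⌊len/2⌋ elements
theorem pv_odd_slice_len {α : Type} (xs : List α) : ((PySem.List.slice? xs (some 1) none 2).getD []).length = xs.length / 2 := by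
  rcases xs with _ | ⟨a, t⟩
  · simp [PySem.List.slice?, PySem.List.sliceIndices]
  · simp only [PySem.List.slice?, PySem.List.sliceIndices]
    norm_num
    rcases Nat.eq_zero_or_pos t.length with h0 | hp
    · simp [h0]
    · rw [if_pos hp]
      have hc : (((t.length : Int) + 2 - 1) / 2).toNat = (t.length + 1) / 2 := by omega
      rw [hc, List.filterMap_length_eq_length.mpr, List.length_range]
      intro x hx
      have hx' := List.mem_range.1 hx
      have ht : (1 + 2 * (x : Int)).toNat = 1 + 2 * x := by omega
      rw [ht]
      have hlt : 1 + 2 * x < (a :: t).length := by simp; omega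
      simp [List.getElem?_eq_getElem hlt]

-- map fst of a zip is a truncated first list
theorem pv_zip_fst_take {α β : Type} (ks : List α) (vs : List β) : List.map Prod.fst (ks.zip vs) = ks.take vs.length := by
  induction ks generalizing vs with
  | nil => simp
  | cons a t ih => cases vs with
    | nil => simp
    | cons b u => simp [ih]

-- dict(zip(ks, vs)) iterates over the first occurrences of the paired keys, in order
theorem pv_keys_ofList_zip {ν : Type} (ks : List String) (vs : List ν) :
    (PySem.Dict.ofList (ks.zip vs)).keys = PySem.List.dedup (ks.take vs.length) := by
  show ((ks.zip vs).foldl (fun d p => d.insert p.1 p.2) PySem.Dict.empty).keys = _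
  rw [PySem.Dict.keys_foldl_insert_key (ks.zip vs) Prod.fst (fun _ p => p.2), pv_zip_fst_take]
  simp only [PySem.List.dedup_eq_ofList, PySem.Dict.keys_empty]
  exact (PySem.Set.ofList_eq_foldl _).symm

-- B's dedup-and-filter loop builds exactly the pvGood-filtered ordered dedup
theorem pv_seen_eq_aux (l d : List String) :
    l.foldl (fun seen t =>
        if t ∉ seen ∧ ¬ PySem.Str.isIn "*" t ∧ ¬ PySem.Str.isIn "#" t ∧ ¬ PySem.Str.isIn "R" t
        then seen ++ [t] else seen) (d.filter pvGood)
      = (l.foldl PySem.Set.add d).filter pvGood := by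
  induction l generalizing d with
  | nil => rfl
  | cons t l ih =>
    simp only [List.foldl_cons]
    have hgoodiff : (¬ PySem.Str.isIn "*" t = true ∧ ¬ PySem.Str.isIn "#" t = true ∧ ¬ PySem.Str.isIn "R" t = true) ↔ pvGood t = true := by
      simp [pvGood, and_assoc]
    by_cases hg : pvGood t = true
    · have hmem : t ∈ d.filter pvGood ↔ t ∈ d := by
        simp [List.mem_filter, hg]
      by_cases hd : t ∈ d
      · rw [if_neg (by simp [hmem, hd]), PySem.Set.add_of_mem hd, ih]
      · have hfil : (d ++ [t]).filter pvGood = d.filter pvGood ++ [t] := by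
          rw [List.filter_append]; simp [hg]
        rw [if_pos ⟨by simp [hmem, hd], hgoodiff.mpr hg⟩, PySem.Set.add_of_not_mem hd, ← hfil, ih]
    · have hbad : ¬ (t ∉ d.filter pvGood ∧ ¬ PySem.Str.isIn "*" t = true ∧ ¬ PySem.Str.isIn "#" t = true ∧ ¬ PySem.Str.isIn "R" t = true) := by
        intro h
        exact hg (hgoodiff.mp h.2)
      rw [if_neg hbad]
      have hsame : (PySem.Set.add d t).filter pvGood = d.filter pvGood := by
        rw [PySem.Set.add_eq_ite]
        split_ifs with h
        · rfl
        · rw [List.filter_append]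
          simp only [Bool.not_eq_true] at hg
          simp [hg]
      rw [← hsame, ih]

-- 'k[0] == "D" and k[1:] == cig'  ↔  k = 'D' + cig, on char lists
theorem pv_Dkey_iff (k rb : String) :
    (((PySem.Str.pyGet? k 0).getD ' ' = 'D') ∧ (PySem.Str.slice rb (some 1) none == PySem.Str.slice k (some 1) none) = true)
      ↔ k = pvDstr rb := by
  have hiff : k = pvDstr rb ↔ k.toList = 'D' :: (PySem.Str.slice rb (some 1) none).toList := by
    constructor
    · intro h; rw [h]; simp [pvDstr]
    · intro h
      have h2 := congrArg String.ofList h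
      rw [String.ofList_toList] at h2
      exact h2
  rw [hiff]
  have h0 : (PySem.Str.pyGet? k 0) = k.toList[0]? := by simp [PySem.List.pyGet?_zero]
  have hsl : ∀ s : String, (PySem.Str.slice s (some 1) none).toList = s.toList.tail := by
    intro s; simp [PySem.List.slice_from_one]
  have hbeq : (PySem.Str.slice rb (some 1) none == PySem.Str.slice k (some 1) none) = true
      ↔ (PySem.Str.slice rb (some 1) none).toList = k.toList.tail := by
    rw [beq_iff_eq]
    constructor
    · intro h; rw [h, hsl]
    · intro h
      have h2 : (PySem.Str.slice rb (some 1) none).toList = (PySem.Str.slice k (some 1) none).toList := by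
        rw [h, hsl]
      calc PySem.Str.slice rb (some 1) none
          = String.ofList (PySem.Str.slice rb (some 1) none).toList := (String.ofList_toList).symm
        _ = String.ofList (PySem.Str.slice k (some 1) none).toList := by rw [h2]
        _ = PySem.Str.slice k (some 1) none := String.ofList_toList
  rw [h0, hbeq]
  cases hL : k.toList with
  | nil => simp
  | cons c t => simp [eq_comm]

-- sums drop the zero terms that pvGood filters away
theorem pv_sum_filter (K : List String) (f : String → Int) (h : ∀ k ∈ K, pvGood k = false → f k = 0) :
    (K.map f).sum = ((K.filter pvGood).map f).sum := by
  induction K with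
  | nil => rfl
  | cons k K ih =>
    have ih' := ih (fun x hx => h x (List.mem_cons_of_mem _ hx))
    by_cases hg : pvGood k = true
    · simp [hg, ih']
    · simp only [List.filter_cons, Bool.not_eq_true] at *
      simp [hg, h k (List.mem_cons_self) (by simp [hg]), ih']

-- the loop-exchange: summing A's per-D-key pair counts over a duplicate-free key set
-- equals one pass over the pairs testing membership of 'D'+cigar
theorem pv_exchange (seen : List String) (hnd : seen.Nodup) (Z : List (String × String)) :
    (seen.map (pvCD Z)).sum
      = (Z.countP (fun rb_ab => PySem.Str.len rb_ab.2 == 1 && seen.contains (pvDstr rb_ab.1)) : Int) := by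
  induction Z with
  | nil =>
    simp only [List.countP_nil, Nat.cast_zero]
    rw [show seen.map (pvCD []) = seen.map (fun _ => (0 : Int)) from
      List.map_congr_left (fun k _ => by simp [pvCD])]
    simp
  | cons p Z ih =>
    rw [List.countP_cons]
    push_cast
    rw [← ih]
    have hsplit : seen.map (pvCD (p :: Z))
        = seen.map (fun k => pvCD Z k + (if ((PySem.Str.pyGet? k 0).getD ' ' = 'D') ∧ pvQ k p = true then 1 else 0)) := by
      apply List.map_congr_left
      intro k _
      by_cases hq : pvQ k p = true <;>
        (simp [pvCD, hq]; try (split_ifs <;> push_cast <;> omega))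
    rw [hsplit, PySem.List.sum_map_add_int]
    congr 1
    have h01 : (seen.map (fun k => if ((PySem.Str.pyGet? k 0).getD ' ' = 'D') ∧ pvQ k p = true then 1 else 0)).sum
        = ((seen.countP (fun k => decide (((PySem.Str.pyGet? k 0).getD ' ' = 'D') ∧ pvQ k p = true))) : Int) := by
      rw [← PySem.List.sum_map_ite_one_zero (fun k => decide (((PySem.Str.pyGet? k 0).getD ' ' = 'D') ∧ pvQ k p = true)) seen]
      apply congrArg
      apply List.map_congr_left
      intro k _
      simp only [decide_eq_true_eq]
    rw [h01]
    have hcnt : seen.countP (fun k => decide (((PySem.Str.pyGet? k 0).getD ' ' = 'D') ∧ pvQ k p = true))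
        = if (PySem.Str.len p.2 == 1) = true then seen.count (pvDstr p.1) else 0 := by
      by_cases hlen : (PySem.Str.len p.2 == 1) = true
      · rw [if_pos hlen, List.count_eq_countP]
        apply List.countP_congr
        intro k _
        constructor
        · intro h
          simp only [decide_eq_true_eq] at h
          have hk := (pv_Dkey_iff k p.1).mp ⟨h.1, by
            have := h.2
            simp only [pvQ, Bool.and_eq_true] at this
            exact this.1⟩
          simp only [beq_iff_eq]
          exact hk
        · intro h
          simp only [beq_iff_eq] at h
          have hk := (pv_Dkey_iff k p.1).mpr h
          simp only [decide_eq_true_eq]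
          exact ⟨hk.1, by simp only [pvQ, Bool.and_eq_true]; exact ⟨by rw [hk.2], hlen⟩⟩
      · rw [if_neg hlen, List.countP_eq_zero]
        intro k _
        simp only [decide_eq_true_eq, not_and]
        intro _
        simp only [pvQ, Bool.and_eq_true, not_and]
        intro _
        exact fun h => hlen h
    rw [hcnt]
    by_cases hlen : (PySem.Str.len p.2 == 1) = true
    · rw [if_pos hlen]
      by_cases hm : pvDstr p.1 ∈ seen
      · rw [List.count_eq_one_of_mem hnd hm]
        simp
        exact ⟨by simpa using hlen, hm⟩
      · rw [List.count_eq_zero_of_not_mem hm]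
        simp
        exact fun _ => hm
    · have hl2 : ¬ p.2.length = 1 := by simpa using hlen
      simp [hl2]

-- A's loop body adds a closed-form contribution per key
theorem pv_bodyA (ref_base_list alt_base_list : List String) (found : Int) (alt_type : String) :
    (if PySem.Str.isIn "*" alt_type || PySem.Str.isIn "#" alt_type || PySem.Str.isIn "R" alt_type then found
      else if (PySem.Str.pyGet? alt_type 0).getD ' ' = 'X' then
        (if alt_base_list.contains (String.ofList [(PySem.Str.pyGet? alt_type 1).getD ' ']) then found + 1 else found)
      else if (PySem.Str.pyGet? alt_type 0).getD ' ' = 'I' then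
        (if alt_base_list.contains (PySem.Str.slice alt_type (some 1) none) then found + 1 else found)
      else if (PySem.Str.pyGet? alt_type 0).getD ' ' = 'D' then
        (ref_base_list.zip alt_base_list).foldl (fun found rb_ab =>
          if PySem.Str.slice rb_ab.1 (some 1) none == PySem.Str.slice alt_type (some 1) none
              && PySem.Str.len rb_ab.2 == 1 then found + 1 else found) found
      else found)
    = found + (if pvGood alt_type then pvCXI alt_base_list alt_type + pvCD (ref_base_list.zip alt_base_list) alt_type else 0) := by
  have hD := PySem.List.foldl_if_add_one (pvQ alt_type) (ref_base_list.zip alt_base_list) found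
  simp only [pvQ] at hD
  simp only [pvGood, pvCXI, pvCD, Bool.not_eq_true']
  split_ifs <;> simp_all

-- B's X/I loop body in the same shape
theorem pv_bodyB (alt_base_list : List String) (found : Int) (k : String) :
    (if (PySem.Str.pyGet? k 0).getD ' ' = 'X' then
        found + (if alt_base_list.contains (String.ofList [(PySem.Str.pyGet? k 1).getD ' ']) then 1 else 0)
      else if (PySem.Str.pyGet? k 0).getD ' ' = 'I' then
        found + (if alt_base_list.contains (PySem.Str.slice k (some 1) none) then 1 else 0)
      else found)
    = found + pvCXI alt_base_list k := by
  simp only [pvCXI]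
  split_ifs <;> omega

-- the whole equality of the two counting phases, for any duplicate-free key list K
theorem pv_counts_eq (ref_base_list alt_base_list : List String) (K : List String) (hnd : K.Nodup) :
    K.foldl (fun found alt_type =>
      if PySem.Str.isIn "*" alt_type || PySem.Str.isIn "#" alt_type || PySem.Str.isIn "R" alt_type then found
      else if (PySem.Str.pyGet? alt_type 0).getD ' ' = 'X' then
        (if alt_base_list.contains (String.ofList [(PySem.Str.pyGet? alt_type 1).getD ' ']) then found + 1 else found)
      else if (PySem.Str.pyGet? alt_type 0).getD ' ' = 'I' then
        (if alt_base_list.contains (PySem.Str.slice alt_type (some 1) none) then found + 1 else found)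
      else if (PySem.Str.pyGet? alt_type 0).getD ' ' = 'D' then
        (ref_base_list.zip alt_base_list).foldl (fun found rb_ab =>
          if PySem.Str.slice rb_ab.1 (some 1) none == PySem.Str.slice alt_type (some 1) none
              && PySem.Str.len rb_ab.2 == 1 then found + 1 else found) found
      else found) (0 : Int)
    = (ref_base_list.zip alt_base_list).foldl (fun found rb_ab =>
        if PySem.Str.len rb_ab.2 == 1
            && (K.filter pvGood).contains (String.ofList ('D' :: (PySem.Str.slice rb_ab.1 (some 1) none).toList))
        then found + 1 else found)
      ((K.filter pvGood).foldl (fun found k =>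
        if (PySem.Str.pyGet? k 0).getD ' ' = 'X' then
          found + (if alt_base_list.contains (String.ofList [(PySem.Str.pyGet? k 1).getD ' ']) then 1 else 0)
        else if (PySem.Str.pyGet? k 0).getD ' ' = 'I' then
          found + (if alt_base_list.contains (PySem.Str.slice k (some 1) none) then 1 else 0)
        else found) (0 : Int)) := by
  -- A side: fold → sum of contributions
  have hA := PySem.List.foldl_congr_mem K
    (fun found alt_type =>
      if PySem.Str.isIn "*" alt_type || PySem.Str.isIn "#" alt_type || PySem.Str.isIn "R" alt_type then found
      else if (PySem.Str.pyGet? alt_type 0).getD ' ' = 'X' then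
        (if alt_base_list.contains (String.ofList [(PySem.Str.pyGet? alt_type 1).getD ' ']) then found + 1 else found)
      else if (PySem.Str.pyGet? alt_type 0).getD ' ' = 'I' then
        (if alt_base_list.contains (PySem.Str.slice alt_type (some 1) none) then found + 1 else found)
      else if (PySem.Str.pyGet? alt_type 0).getD ' ' = 'D' then
        (ref_base_list.zip alt_base_list).foldl (fun found rb_ab =>
          if PySem.Str.slice rb_ab.1 (some 1) none == PySem.Str.slice alt_type (some 1) none
              && PySem.Str.len rb_ab.2 == 1 then found + 1 else found) found
      else found)
    (fun found k => found + (if pvGood k then pvCXI alt_base_list k + pvCD (ref_base_list.zip alt_base_list) k else 0)) 0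
    (fun acc x _ => pv_bodyA ref_base_list alt_base_list acc x)
  rw [hA, PySem.List.foldl_add]
  -- B side: X/I fold → sum, D fold → countP
  have hB := PySem.List.foldl_congr_mem (K.filter pvGood)
    (fun found k =>
      if (PySem.Str.pyGet? k 0).getD ' ' = 'X' then
        found + (if alt_base_list.contains (String.ofList [(PySem.Str.pyGet? k 1).getD ' ']) then 1 else 0)
      else if (PySem.Str.pyGet? k 0).getD ' ' = 'I' then
        found + (if alt_base_list.contains (PySem.Str.slice k (some 1) none) then 1 else 0)
      else found)
    (fun found k => found + pvCXI alt_base_list k) 0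
    (fun acc x _ => pv_bodyB alt_base_list acc x)
  rw [hB, PySem.List.foldl_add]
  rw [show (fun (found : Int) (rb_ab : String × String) =>
        if PySem.Str.len rb_ab.2 == 1
            && (K.filter pvGood).contains (String.ofList ('D' :: (PySem.Str.slice rb_ab.1 (some 1) none).toList))
        then found + 1 else found)
      = (fun (found : Int) (rb_ab : String × String) =>
        if (fun (rb_ab : String × String) => PySem.Str.len rb_ab.2 == 1
            && (K.filter pvGood).contains (pvDstr rb_ab.1)) rb_ab
        then found + 1 else found) from rfl]
  rw [PySem.List.foldl_if_add_one]
  -- now pure sums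
  rw [pv_sum_filter K _ (fun k _ hbad => by simp [hbad])]
  rw [show (K.filter pvGood).map (fun k => if pvGood k = true then pvCXI alt_base_list k + pvCD (ref_base_list.zip alt_base_list) k else 0)
      = (K.filter pvGood).map (fun k => pvCXI alt_base_list k + pvCD (ref_base_list.zip alt_base_list) k) from
    List.map_congr_left (fun k hk => by rw [if_pos (List.of_mem_filter hk)])]
  rw [PySem.List.sum_map_add_int, pv_exchange (K.filter pvGood) (hnd.filter _) (ref_base_list.zip alt_base_list)]
  ring

-- ===== VERDICT (by name: the statement is the Claim_ definition above) =====
theorem find_read_support_spec : Claim_equal_find_read_support := by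
  intro pos truth_alt_dict alt_info _hdom _hpre
  unfold Spec_find_read_support find_read_support find_read_support_alt
  cases hget : (PySem.Dict.mk truth_alt_dict).get? pos with
  | none => simp
  | some rba =>
    obtain ⟨ref_base_list, alt_base_list⟩ := rba
    simp only []
    generalize (if 1 < ((PySem.Str.split? (PySem.Str.rstrip alt_info) "-").getD []).length then (PySem.Str.split? ((PySem.List.pyGet? ((PySem.Str.split? (PySem.Str.rstrip alt_info) "-").getD []) 1).getD "") " ").getD [] else []) = seqs
    have hkeys : (if seqs.length ≠ 0 then
          PySem.Dict.ofList (((PySem.List.slice? seqs none none 2).getD []).zip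
            (((PySem.List.slice? seqs (some 1) none 2).getD []).map (fun item => (PySem.Int.ofStr? item).getD 0)))
        else PySem.Dict.empty).keys
        = PySem.List.dedup (((PySem.List.slice? seqs none none 2).getD []).take (seqs.length / 2)) := by
      by_cases h0 : seqs.length = 0
      · have hnil : seqs = [] := List.length_eq_zero_iff.mp h0
        subst hnil
        simp [PySem.List.slice?, PySem.List.sliceIndices, PySem.Dict.keys_empty]
      · rw [if_pos h0, pv_keys_ofList_zip, List.length_map, pv_odd_slice_len]
    rw [hkeys]
    have hseen := pv_seen_eq_aux (((PySem.List.slice? seqs none none 2).getD []).take (seqs.length / 2)) []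
    simp only [List.filter_nil] at hseen
    rw [hseen, ← PySem.Set.ofList_eq_foldl, ← PySem.List.dedup_eq_ofList]
    have hnd : (PySem.List.dedup (((PySem.List.slice? seqs none none 2).getD []).take (seqs.length / 2))).Nodup := by
      rw [PySem.List.dedup_eq_ofList]; exact PySem.Set.nodup_ofList _
    rw [pv_counts_eq ref_base_list alt_base_list _ hnd]
    split_ifs with h
    · rw [decide_eq_true h]
    · rw [decide_eq_false h]
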